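-- pv_equiv track=rewrite | github.com/mishagreh/CodewarsKatasProject | 6kyu/reducing_a_pyramid.py | reduce_pyramid
-- ===== SOURCE A (Python) =====
-- import itertools as it
--
-- def reduce_pyramid(base):
--     """ returns the pyramid's top """
--
--     # 1) special case of one input element handler
--
--     # 2) building a list of a row coefficients, e.g. [1, 4, 6, 4, 1] for [n1, n2, n3, n4, n5, n6]
--     #    according to Pascal's triangle
--
--     # 3) building summation pairs, e.g. [(1, 2), (2, 3), (3, 4)] for base = [1, 2, 3, 4]
--
--     # 4) put coef and pairs lists together
--
--     # 5) calculating and returning the final sum (pyramid's top)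
--
--     if len(base) == 1:
--         return base[0]
--
--     coef = [1]
--     for i in range(1, len(base) - 1):
--         coef.append(int(coef[i - 1] * ((len(base) - 2) + 1 - i) // i))
--
--     x = list(it.pairwise(base))
--
--     y = list(zip(coef, x))
--
--     return sum([i[0] * sum(i[1]) for i in y])
-- ===== SOURCE B (Python) =====
-- def reduce_pyramid(base):
--     """ returns the pyramid's top """
--     if not base:
--         return 0
--     row = list(base)
--     while len(row) > 1:
--         row = [row[i] + row[i + 1] for i in range(len(row) - 1)]
--     return row[0]
-- ===== Notes on version B (the rewrite author's own statement) =====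
-- stated objective: simpler
-- what changed: B collapses the pyramid layer by layer with adjacent sums instead of A's one-pass binomial-coefficient weighted sum over pairwise elements.
import Mathlib
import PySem

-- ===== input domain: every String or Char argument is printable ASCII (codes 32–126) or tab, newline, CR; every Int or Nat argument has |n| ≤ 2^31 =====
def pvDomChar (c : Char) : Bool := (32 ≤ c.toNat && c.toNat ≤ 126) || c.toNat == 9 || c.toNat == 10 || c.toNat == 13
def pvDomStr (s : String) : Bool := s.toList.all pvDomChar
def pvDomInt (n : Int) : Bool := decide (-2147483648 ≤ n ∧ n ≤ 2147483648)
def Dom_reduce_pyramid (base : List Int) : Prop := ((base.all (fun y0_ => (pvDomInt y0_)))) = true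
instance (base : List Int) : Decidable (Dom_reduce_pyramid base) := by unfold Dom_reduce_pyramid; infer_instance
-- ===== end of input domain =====

-- B collapses the pyramid layer by layer with adjacent sums instead of A's binomial-weighted sum (simpler).


-- ===== PORT A =====
def reduce_pyramid (base : List Int) : Int :=
  if base.length = 1 then (PySem.List.pyGet? base 0).getD 0
  else
    let n : Int := base.length
    let coef : List Int := (PySem.List.pyRange 1 (n - 1) 1).foldl
      (fun c i => c ++ [PySem.Int.floordiv (PySem.List.pyGetD c (i - 1) 0 * ((n - 2) + 1 - i)) i]) [1]
    let x := base.zip base.tail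
    let y := coef.zip x
    (y.map (fun p => p.1 * (p.2.1 + p.2.2))).foldl (· + ·) 0

-- ===== PORT B =====
-- one layer of the reduction: [row[i] + row[i+1] for i in range(len(row)-1)]
def pvStep (row : List Int) : List Int :=
  (row.zip row.tail).map (fun p => p.1 + p.2)

theorem pvStep_length (row : List Int) : (pvStep row).length = row.length - 1 := by
  simp [pvStep]

-- while len(row) > 1: row = step row;  return row[0]
def pvCollapse (row : List Int) : Int :=
  match row with
  | [] => 0
  | [x] => x
  | a :: b :: t => pvCollapse (pvStep (a :: b :: t))
termination_by row.length
decreasing_by simp [pvStep_length]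

def reduce_pyramid_alt (base : List Int) : Int :=
  if base = [] then 0 else pvCollapse base

-- ===== PRECONDITION & SPEC =====
def Spec_reduce_pyramid (base : List Int) (out : Int) : Prop := out = reduce_pyramid_alt base
instance (base : List Int) (out : Int) : Decidable (Spec_reduce_pyramid base out) := by unfold Spec_reduce_pyramid; infer_instance

-- ===== CLAIM (what is proved, stated in full; the proofs are below) =====
def Claim_equal_reduce_pyramid : Prop := ∀ (base : List Int), Dom_reduce_pyramid base → Spec_reduce_pyramid base (reduce_pyramid base)

-- ===== LEMMAS AND PROOFS =====

-- binomial-weighted value of a row: the pyramid's top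
def pvTop (l : List Int) : Int :=
  ∑ i ∈ Finset.range l.length, ((l.length - 1).choose i : Int) * l.getD i 0

theorem pvStep_getD (l : List Int) (i : Nat) (hi : i + 1 < l.length) :
    (pvStep l).getD i 0 = l.getD i 0 + l.getD (i + 1) 0 := by
  have h1 : i < (pvStep l).length := by rw [pvStep_length]; omega
  have h2 : i < (l.zip l.tail).length := by
    simpa [pvStep] using h1
  have hti : i < l.tail.length := by simp; omega
  rw [List.getD_eq_getElem _ _ h1, List.getD_eq_getElem _ _ (by omega : i < l.length),
      List.getD_eq_getElem _ _ hi]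
  simp [pvStep, List.getElem_zip, List.getElem_tail]

theorem pvTop_step (l : List Int) (k : Nat) (hl : l.length = k + 2) :
    pvTop (pvStep l) = pvTop l := by
  have hsl : (pvStep l).length = k + 1 := by rw [pvStep_length, hl]; omega
  have hstep : ∀ i ∈ Finset.range (k + 1),
      ((k.choose i : Int)) * (pvStep l).getD i 0
        = (k.choose i : Int) * (l.getD i 0 + l.getD (i + 1) 0) := by
    intro i hi
    rw [pvStep_getD l i (by simp at hi; omega)]
  unfold pvTop
  rw [hsl, hl]
  have e1 : k + 1 - 1 = k := by omega
  have e2 : k + 2 - 1 = k + 1 := by omega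
  rw [e1, e2]
  rw [Finset.sum_congr rfl hstep]
  have expand : ∀ i ∈ Finset.range (k + 1),
      (k.choose i : Int) * (l.getD i 0 + l.getD (i + 1) 0)
        = (k.choose i : Int) * l.getD i 0 + (k.choose i : Int) * l.getD (i + 1) 0 := by
    intro i _; ring
  rw [Finset.sum_congr rfl expand, Finset.sum_add_distrib]
  -- RHS: peel both ends
  have e3 : k + 2 = (k + 1) + 1 := by omega
  rw [e3, Finset.sum_range_succ' (fun i => ((k + 1).choose i : Int) * l.getD i 0) (k + 1)]
  have hpascal : ∀ i, (((k + 1).choose (i + 1) : Int)) = (k.choose i : Int) + (k.choose (i + 1) : Int) := by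
    intro i; exact_mod_cast congrArg (Nat.cast : Nat → Int) (Nat.choose_succ_succ k i)
  have : ∀ i ∈ Finset.range (k + 1),
      ((k + 1).choose (i + 1) : Int) * l.getD (i + 1) 0
        = (k.choose i : Int) * l.getD (i + 1) 0 + (k.choose (i + 1) : Int) * l.getD (i + 1) 0 := by
    intro i _; rw [hpascal]; ring
  rw [Finset.sum_congr rfl this, Finset.sum_add_distrib]
  have hfirst : (∑ i ∈ Finset.range (k + 1), (k.choose i : Int) * l.getD i 0)
      = (∑ i ∈ Finset.range (k + 1), (k.choose (i + 1) : Int) * l.getD (i + 1) 0)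
        + ((k.choose 0 : Int)) * l.getD 0 0 := by
    have h1 : (∑ i ∈ Finset.range (k + 2), (k.choose i : Int) * l.getD i 0)
        = (∑ i ∈ Finset.range (k + 1), (k.choose (i + 1) : Int) * l.getD (i + 1) 0)
          + ((k.choose 0 : Int)) * l.getD 0 0 :=
      Finset.sum_range_succ' (fun i => (k.choose i : Int) * l.getD i 0) (k + 1)
    have h2 : (∑ i ∈ Finset.range (k + 2), (k.choose i : Int) * l.getD i 0)
        = (∑ i ∈ Finset.range (k + 1), (k.choose i : Int) * l.getD i 0)
          + ((k.choose (k + 1) : Int)) * l.getD (k + 1) 0 :=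
      Finset.sum_range_succ (fun i => (k.choose i : Int) * l.getD i 0) (k + 1)
    rw [Nat.choose_succ_self] at h2
    simp only [Nat.cast_zero, zero_mul, add_zero] at h2
    rw [← h2, h1]
  rw [hfirst]
  simp [Nat.choose_zero_right]
  ring

theorem pvCollapse_eq_pvTop (l : List Int) (hne : l ≠ []) : pvCollapse l = pvTop l := by
  induction hn : l.length using Nat.strong_induction_on generalizing l with
  | _ n ih =>
    match l, hne with
    | [x], _ => simp [pvCollapse, pvTop]
    | a :: b :: t, _ =>
      rw [pvCollapse]
      have hlen : (pvStep (a :: b :: t)).length = t.length + 1 := by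
        rw [pvStep_length]; simp
      have hne' : pvStep (a :: b :: t) ≠ [] := by
        intro h; rw [h] at hlen; simp at hlen
      have hlt : (pvStep (a :: b :: t)).length < n := by
        rw [hlen, ← hn]; simp
      rw [ih _ hlt _ hne' rfl]
      exact pvTop_step _ t.length (by simp)

-- A's coefficient loop builds the binomial coefficients C(k, 0..m)
theorem pvCoef (k : Nat) :
    ∀ m : Nat, m ≤ k →
      (PySem.List.pyRange 1 ((m : Int) + 1) 1).foldl
        (fun c i => c ++ [PySem.Int.floordiv (PySem.List.pyGetD c (i - 1) 0 * ((((k : Int) + 2) - 2) + 1 - i)) i]) [1]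
      = (List.range (m + 1)).map (fun i => (k.choose i : Int)) := by
  intro m
  induction m with
  | zero =>
    intro _
    rw [PySem.List.pyRange_one_eq_nil (by omega)]
    simp
  | succ m ihm =>
    intro hm
    push_cast
    have hsplit : PySem.List.pyRange 1 (((m : Nat) + 1 : Int) + 1) 1
        = PySem.List.pyRange 1 ((m : Int) + 1) 1 ++ [((m : Int) + 1)] :=
      PySem.List.pyRange_one_succ_right (a := 1) (b := (m : Int) + 1) (by omega)
    rw [hsplit, List.foldl_append, ihm (by omega)]
    simp only [List.foldl_cons, List.foldl_nil]
    have hidx : ((m : Int) + 1) - 1 = (m : Int) := by ring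
    rw [hidx]
    have hget : PySem.List.pyGetD ((List.range (m + 1)).map (fun i => (k.choose i : Int))) (m : Int) 0
        = (k.choose m : Int) := by
      rw [PySem.List.pyGetD_natCast]
      rw [List.getD_eq_getElem _ _ (by simp)]
      simp
    rw [hget]
    have harith : (((k : Int) + 2) - 2) + 1 - ((m : Int) + 1) = ((k - m : Nat) : Int) := by
      have : ((k - m : Nat) : Int) = (k : Int) - (m : Int) := by
        omega
      rw [this]; ring
    rw [harith]
    have hmul : (k.choose m : Int) * ((k - m : Nat) : Int) = ((k.choose (m + 1) * (m + 1) : Nat) : Int) := by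
      exact_mod_cast (Nat.choose_succ_right_eq k m).symm
    rw [hmul]
    have hfd : PySem.Int.floordiv ((k.choose (m + 1) * (m + 1) : Nat) : Int) ((m : Int) + 1)
        = (k.choose (m + 1) : Int) := by
      have hc : ((m : Int) + 1) = ((m + 1 : Nat) : Int) := by push_cast; ring
      rw [hc, PySem.Int.floordiv_natCast, Nat.mul_div_cancel _ (by omega)]
    rw [hfd]
    simp [List.range_succ]

-- list-sum bridge
theorem pvFoldlSum' : ∀ (l : List Int) (a : Int), l.foldl (· + ·) a = a + ∑ i ∈ Finset.range l.length, l.getD i 0 := by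
  intro l
  induction l with
  | nil => intro a; simp
  | cons x t ih =>
    intro a
    simp only [List.foldl_cons, List.length_cons]
    rw [ih (a + x), Finset.sum_range_succ' (fun i => (x :: t).getD i 0) t.length]
    simp
    ring

theorem pvFoldlSum (l : List Int) : l.foldl (· + ·) 0 = ∑ i ∈ Finset.range l.length, l.getD i 0 := by
  rw [pvFoldlSum' l 0, zero_add]

theorem pvA_eq (base : List Int) (k : Nat) (hl : base.length = k + 2) :
    reduce_pyramid base = pvTop (pvStep base) := by
  have hlen1 : ¬ base.length = 1 := by omega
  have hn : (base.length : Int) = (k : Int) + 2 := by rw [hl]; push_cast; ring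
  simp only [reduce_pyramid, hlen1, if_false, hn]
  have hb : ((k : Int) + 2) - 1 = (k : Int) + 1 := by ring
  rw [hb, pvCoef k k le_rfl]
  rw [pvFoldlSum]
  have hlz : (base.zip base.tail).length = k + 1 := by simp [hl]
  have hLm : ((((List.range (k + 1)).map (fun i => (k.choose i : Int))).zip (base.zip base.tail)).map
      (fun p => p.1 * (p.2.1 + p.2.2))).length = k + 1 := by
    simp [hlz]
  rw [hLm]
  unfold pvTop
  have hsl : (pvStep base).length = k + 1 := by rw [pvStep_length, hl]; omega
  rw [hsl]
  have e1 : k + 1 - 1 = k := by omega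
  rw [e1]
  apply Finset.sum_congr rfl
  intro i hi
  rw [Finset.mem_range] at hi
  have h1 : i < ((((List.range (k + 1)).map (fun i => (k.choose i : Int))).zip (base.zip base.tail)).map
      (fun p => p.1 * (p.2.1 + p.2.2))).length := by rw [hLm]; exact hi
  have h2 : i < (pvStep base).length := by rw [hsl]; exact hi
  rw [List.getD_eq_getElem _ _ h1, List.getD_eq_getElem _ _ h2]
  simp [pvStep, List.getElem_zip]

-- ===== VERDICT (by name: the statement is the Claim_ definition above) =====
theorem reduce_pyramid_spec : Claim_equal_reduce_pyramid := by
  intro base _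
  unfold Spec_reduce_pyramid reduce_pyramid_alt
  match base with
  | [] => decide
  | [x] => simp [reduce_pyramid, pvCollapse, PySem.List.pyGet?, PySem.List.pyIdx?]
  | a :: b :: t =>
    have hl : (a :: b :: t).length = t.length + 2 := by simp
    rw [pvA_eq _ t.length hl, pvTop_step _ t.length hl,
        pvCollapse_eq_pvTop _ (by simp)]
    simp
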